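-- pv_equiv track=rewrite | github.com/camelwater/Table-BOT | utils/Utils.py | check_repeat_times_slow
-- ===== SOURCE A (Python) =====
-- def check_repeat_times_slow(race, prev_races):
--     repetitions = {}
--     race = [(i[2], i[1]) for i in race]
--     prev_races = [[(i[2], i[1]) for i in r] for r in prev_races]
--
--     for i, r in enumerate(prev_races[::-1]):
--         cou = len([c for c in race if c in r])
--         if cou>0:
--             repetitions[i] = cou
--
--     try:
--         max_key = max(repetitions, key=repetitions.get)
--     except ValueError:
--         max_key = None
--
--     return (True, {'race': len(prev_races)-max_key, 'num_aff': repetitions[max_key]}) if max_key else (False, {})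
-- ===== SOURCE B (Python) =====
-- def check_repeat_times_slow(race, prev_races):
--     # Count the transformed race entries once, then score each previous race
--     # in a single forward pass over its distinct entries; keep the best race,
--     # preferring the most recent on ties.
--     cnt = {}
--     for i in race:
--         e = (i[2], i[1])
--         cnt[e] = cnt.get(e, 0) + 1
--     best = 0
--     best_j = None
--     for j, r in enumerate(prev_races):
--         seen = set()
--         overlap = 0
--         for i in r:
--             e = (i[2], i[1])
--             if e not in seen:
--                 seen.add(e)
--                 overlap += cnt.get(e, 0)
--         if overlap > 0 and overlap >= best:
--             best = overlap
--             best_j = j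
--     if best_j is None:
--         return (False, {})
--     return (True, {'race': best_j + 1, 'num_aff': best})
-- ===== Notes on version B (the rewrite author's own statement) =====
-- stated objective: alternative
-- what changed: B replaces A's reversed enumeration with nested list-membership scans and a repetitions dict maxed by key lookup by a counter of the transformed race entries built once, scoring each previous race in a single forward pass over its distinct entries and tracking the best index forward (most recent wins ties).
-- intended difference: When the most recent previous race has positive overlap at least as large as every other previous race, A's max_key is 0, which is falsy, so A silently discards the winner and returns (False, {}); B returns (True, {'race': len(prev_races), 'num_aff': overlap}), the intended report of the repeat. — e.g. on check_repeat_times_slow([(1, 2, 3)], [[(1, 2, 3)]]): A returns (false, []), B returns (true, [("race", 1), ("num_aff", 1)])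
import Mathlib
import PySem

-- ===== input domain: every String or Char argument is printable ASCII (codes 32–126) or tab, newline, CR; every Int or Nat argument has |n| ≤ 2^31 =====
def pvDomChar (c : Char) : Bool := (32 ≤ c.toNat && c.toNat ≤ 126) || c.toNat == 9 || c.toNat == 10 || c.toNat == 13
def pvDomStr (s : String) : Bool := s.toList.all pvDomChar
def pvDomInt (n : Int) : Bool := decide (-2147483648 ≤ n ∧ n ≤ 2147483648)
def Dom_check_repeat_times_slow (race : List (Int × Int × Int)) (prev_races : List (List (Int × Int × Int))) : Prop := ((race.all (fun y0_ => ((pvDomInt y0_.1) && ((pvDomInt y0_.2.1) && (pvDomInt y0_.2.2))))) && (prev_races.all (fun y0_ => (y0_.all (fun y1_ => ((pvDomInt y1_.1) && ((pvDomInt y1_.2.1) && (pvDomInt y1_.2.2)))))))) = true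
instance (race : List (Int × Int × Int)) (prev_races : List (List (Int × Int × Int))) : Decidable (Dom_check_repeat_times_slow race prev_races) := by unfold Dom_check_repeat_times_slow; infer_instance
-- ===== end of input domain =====

-- B builds a counter of race entries once and scans each previous race forward over its
-- distinct entries (a different decomposition of the same task). On inputs where the most
-- recent previous race is a weak winner with positive overlap, A's falsy max_key==0 makes it
-- return (False, {}); B reports that race (intended difference, see D_ below).


-- ===== PORT A =====
def check_repeat_times_slow (race : List (Int × Int × Int)) (prev_races : List (List (Int × Int × Int))) : Bool × (List (String × Int)) :=
  -- race = [(i[2], i[1]) for i in race]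
  let race2 := race.map (fun i => (i.2.2, i.2.1))
  -- prev_races = [[(i[2], i[1]) for i in r] for r in prev_races]
  let prev2 := prev_races.map (fun r => r.map (fun i => (i.2.2, i.2.1)))
  -- for i, r in enumerate(prev_races[::-1]): cou = len([c for c in race if c in r]); if cou > 0: repetitions[i] = cou
  let repetitions : PySem.Dict Int Int :=
    (PySem.List.enumerate prev2.reverse).foldl
      (fun d p =>
        let cou : Int := PySem.List.len (race2.filter (fun c => p.2.contains c))
        if cou > 0 then d.insert p.1 cou else d)
      PySem.Dict.empty
  -- try: max_key = max(repetitions, key=repetitions.get) except ValueError: max_key = None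
  let max_key : Option Int := PySem.List.max? repetitions.keys (fun k => repetitions.getD k 0)
  -- return (True, {'race': len(prev_races)-max_key, 'num_aff': repetitions[max_key]}) if max_key else (False, {})
  match max_key with
  | some k =>
      if k ≠ 0 then
        (true, [("race", PySem.List.len prev2 - k), ("num_aff", repetitions.getD k 0)])
      else (false, [])
  | none => (false, [])

-- ===== PORT B =====
def check_repeat_times_slow_alt (race : List (Int × Int × Int)) (prev_races : List (List (Int × Int × Int))) : Bool × (List (String × Int)) :=
  -- cnt = {}; for i in race: e = (i[2], i[1]); cnt[e] = cnt.get(e, 0) + 1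
  let cnt : PySem.Dict (Int × Int) Int :=
    race.foldl (fun d i => d.insert (i.2.2, i.2.1) (d.getD (i.2.2, i.2.1) 0 + 1)) PySem.Dict.empty
  -- for j, r in enumerate(prev_races): seen = set(); overlap = 0; for i in r: … ; best/best_j update
  let res : Int × Option Int :=
    (PySem.List.enumerate prev_races).foldl
      (fun (st : Int × Option Int) p =>
        let inner : PySem.Set (Int × Int) × Int :=
          p.2.foldl
            (fun (q : PySem.Set (Int × Int) × Int) i =>
              if PySem.Set.contains q.1 (i.2.2, i.2.1) then q
              else (PySem.Set.add q.1 (i.2.2, i.2.1), q.2 + cnt.getD (i.2.2, i.2.1) 0))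
            (PySem.Set.empty, 0)
        if inner.2 > 0 ∧ inner.2 ≥ st.1 then (inner.2, some p.1) else st)
      (0, none)
  -- if best_j is None: return (False, {}) ; else (True, {'race': best_j + 1, 'num_aff': best})
  match res.2 with
  | some j => (true, [("race", j + 1), ("num_aff", res.1)])
  | none => (false, [])

-- ===== PRECONDITION & SPEC =====

-- how many race entries share their (i[2], i[1]) projection with some entry of a previous
-- race r: an input-level count used to state D_.
def pvOverlapN (race : List (Int × Int × Int)) (r : List (Int × Int × Int)) : Nat :=
  race.countP (fun i => decide (∃ x ∈ r, x.2.2 = i.2.2 ∧ x.2.1 = i.2.1))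

-- When the most recent previous race has positive overlap at least as large as every other
-- previous race, A's max_key is 0, which is falsy, so A discards the winner and returns
-- (False, {}); B returns (True, {'race': len(prev_races), 'num_aff': overlap}), the intended
-- report of the repeat.
def D_check_repeat_times_slow (race : List (Int × Int × Int)) (prev_races : List (List (Int × Int × Int))) : Prop :=
  prev_races ≠ [] ∧ 0 < pvOverlapN race (prev_races.getLastD []) ∧
    ∀ r ∈ prev_races, pvOverlapN race r ≤ pvOverlapN race (prev_races.getLastD [])
instance (race : List (Int × Int × Int)) (prev_races : List (List (Int × Int × Int))) : Decidable (D_check_repeat_times_slow race prev_races) := by unfold D_check_repeat_times_slow; infer_instance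

def Spec_check_repeat_times_slow (race : List (Int × Int × Int)) (prev_races : List (List (Int × Int × Int))) (out : Bool × (List (String × Int))) : Prop := ¬ D_check_repeat_times_slow race prev_races → out = check_repeat_times_slow_alt race prev_races
instance (race : List (Int × Int × Int)) (prev_races : List (List (Int × Int × Int))) (out : Bool × (List (String × Int))) : Decidable (Spec_check_repeat_times_slow race prev_races out) := by unfold Spec_check_repeat_times_slow; infer_instance

def pvDiffWitness_check_repeat_times_slow : (List (Int × Int × Int)) × (List (List (Int × Int × Int))) :=
  ([(1, 2, 3)], [[(1, 2, 3)]])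
def pvDiffWitnessOut_check_repeat_times_slow : (Bool × (List (String × Int))) × (Bool × (List (String × Int))) :=
  ((false, []), (true, [("race", 1), ("num_aff", 1)]))

-- ===== CLAIM (what is proved, stated in full; the proofs are below) =====
def Claim_unchanged_check_repeat_times_slow : Prop := ∀ (race : List (Int × Int × Int)) (prev_races : List (List (Int × Int × Int))), Dom_check_repeat_times_slow race prev_races → Spec_check_repeat_times_slow race prev_races (check_repeat_times_slow race prev_races)
def Claim_changed_check_repeat_times_slow : Prop := Dom_check_repeat_times_slow (pvDiffWitness_check_repeat_times_slow.1) (pvDiffWitness_check_repeat_times_slow.2) ∧ D_check_repeat_times_slow (pvDiffWitness_check_repeat_times_slow.1) (pvDiffWitness_check_repeat_times_slow.2) ∧ check_repeat_times_slow (pvDiffWitness_check_repeat_times_slow.1) (pvDiffWitness_check_repeat_times_slow.2) = pvDiffWitnessOut_check_repeat_times_slow.1 ∧ check_repeat_times_slow_alt (pvDiffWitness_check_repeat_times_slow.1) (pvDiffWitness_check_repeat_times_slow.2) = pvDiffWitnessOut_check_repeat_times_slow.2 ∧ pvDiffWitnessOut_check_repeat_times_slow.1 ≠ pvDiffWitn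essOut_check_repeat_times_slow.2
def Claim_exact_check_repeat_times_slow : Prop := ∀ (race : List (Int × Int × Int)) (prev_races : List (List (Int × Int × Int))), Dom_check_repeat_times_slow race prev_races → D_check_repeat_times_slow race prev_races → check_repeat_times_slow race prev_races ≠ check_repeat_times_slow_alt race prev_races

-- ===== LEMMAS AND PROOFS =====

-- the overlap count and overlap-count list both ports are abstracted through
def pvOverlap (race2 : List (Int × Int)) (r : List (Int × Int)) : Int :=
  PySem.List.len (race2.filter (fun c => r.contains c))

def pvVs (race : List (Int × Int × Int)) (prev_races : List (List (Int × Int × Int))) : List Int :=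
  (prev_races.map (fun r => r.map (fun i => (i.2.2, i.2.1)))).map
    (pvOverlap (race.map (fun i => (i.2.2, i.2.1))))

-- small step functions used to state the fold invariants
def pvMStep {α : Type} (key : α → Int) (acc : Option α) (x : α) : Option α :=
  match acc with | none => some x | some m => if key m < key x then some x else some m

def pvLamStep (st : Int × Option Int) (p : Int × Int) : Int × Option Int :=
  if p.2 > 0 ∧ p.2 ≥ st.1 then (p.2, some p.1) else st

theorem pv_max?_eq_foldl {α : Type} (key : α → Int) (l : List α) :
    PySem.List.max? l key = l.foldl (pvMStep key) none := rfl

-- enumerate with a shifted start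
theorem pv_enum_shift {α : Type} (xs : List α) (s : Int) :
    PySem.List.enumerate xs s = (PySem.List.enumerate xs 0).map (fun p => (s + p.1, p.2)) := by
  simp [PySem.List.enumerate_eq_zipIdx_map, List.map_map, Function.comp_def]

theorem pv_enumerate_map {α β : Type} (g : α → β) (xs : List α) :
    PySem.List.enumerate (xs.map g) = (PySem.List.enumerate xs).map (fun p => (p.1, g p.2)) := by
  simp [PySem.List.enumerate_eq_zipIdx_map, List.zipIdx_map, List.map_map, Function.comp_def,
    Prod.map]

-- enumerating the reverse = reversing the enumeration and flipping indices
theorem pv_enum_rev (vs : List Int) :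
    PySem.List.enumerate vs.reverse
      = ((PySem.List.enumerate vs).reverse).map (fun p => ((vs.length : Int) - 1 - p.1, p.2)) := by
  induction vs using List.reverseRecOn with
  | nil => rfl
  | append_singleton ws v ih =>
    rw [List.reverse_append, List.reverse_singleton, List.singleton_append,
      PySem.List.enumerate_cons, pv_enum_shift ws.reverse (0 + 1), ih,
      PySem.List.enumerate_append, List.reverse_append]
    simp only [PySem.List.enumerate_cons, PySem.List.enumerate_nil, List.map_map,
      List.length_append, List.length_singleton]
    congr 1
    · simp only [Prod.ext_iff]
      refine ⟨?_, trivial⟩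
      push_cast
      ring
    · apply List.map_congr_left
      intro p _
      simp only [Function.comp_apply, Prod.ext_iff]
      refine ⟨?_, trivial⟩
      push_cast
      ring

theorem pv_countP_or_disjoint {α : Type} (l : List α) (p q : α → Bool)
    (h : ∀ c ∈ l, ¬(p c = true ∧ q c = true)) :
    l.countP (fun c => p c || q c) = l.countP p + l.countP q := by
  induction l with
  | nil => simp
  | cons x l ih =>
    simp only [List.countP_cons]
    rw [ih (fun c hc => h c (List.mem_cons_of_mem _ hc))]
    have hx := h x List.mem_cons_self
    by_cases hp : p x <;> by_cases hq : q x <;> simp_all <;> omega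

-- the inner seen/overlap loop of B counts the race entries appearing in s
theorem pv_inner_spec (race2 : List (Int × Int)) (s : List (Int × Int))
    (seen : PySem.Set (Int × Int)) (o : Int) :
    (s.foldl (fun q e => if PySem.Set.contains q.1 e then q
        else (PySem.Set.add q.1 e, q.2 + (PySem.Dict.counter race2).getD e 0)) (seen, o)).2
      = o + (race2.countP (fun c => s.contains c && !(PySem.Set.contains seen c)) : Int) := by
  induction s generalizing seen o with
  | nil => simp
  | cons e s ih =>
    rw [List.foldl_cons]
    by_cases hm : e ∈ seen
    · rw [if_pos ((PySem.Set.contains_iff seen e).mpr hm), ih]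
      congr 2
      apply List.countP_congr
      intro c _
      by_cases hce : c = e
      · subst hce
        simp [PySem.Set.contains, List.contains_eq_mem, hm]
      · simp [PySem.Set.contains, List.contains_eq_mem, hce]
    · rw [if_neg (by simp [PySem.Set.contains, List.contains_eq_mem, hm]), ih,
        PySem.Dict.getD_counter]
      have key : (List.countP (fun c => (e :: s).contains c && !(PySem.Set.contains seen c)) race2)
          = race2.count e + List.countP
              (fun c => s.contains c && !(PySem.Set.contains (PySem.Set.add seen e) c)) race2 := by
        rw [List.count_eq_countP,
          ← pv_countP_or_disjoint race2 (fun c => c == e)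
            (fun c => s.contains c && !(PySem.Set.contains (PySem.Set.add seen e) c))
            (by
              rintro c _ ⟨h1, h2⟩
              have hce : c = e := by simpa using h1
              subst hce
              simp [PySem.Set.contains, List.contains_eq_mem, PySem.Set.mem_add] at h2)]
        apply List.countP_congr
        intro c _
        by_cases hce : c = e
        · subst hce
          simp [PySem.Set.contains, List.contains_eq_mem, hm]
        · simp [PySem.Set.contains, List.contains_eq_mem, hce,
            PySem.Set.mem_add]
      rw [key]
      push_cast
      ring

-- the conditional-insert loop of A over fresh distinct keys appends its filtered input
theorem pv_reps_items (l : List (Int × Int)) (d : PySem.Dict Int Int)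
    (h : ∀ p ∈ l, d.contains p.1 = false) (hnd : (l.map (fun p => p.1)).Nodup) :
    (l.foldl (fun d p => if p.2 > 0 then d.insert p.1 p.2 else d) d).items
      = d.items ++ l.filter (fun p => decide (p.2 > 0)) := by
  induction l generalizing d with
  | nil => simp
  | cons p l ih =>
    simp only [List.map_cons, List.nodup_cons] at hnd
    by_cases hp : p.2 > 0
    · have hfresh : ∀ q ∈ l, (d.insert p.1 p.2).contains q.1 = false := by
        intro q hq
        rw [PySem.Dict.contains_insert]
        have h1 : (q.1 == p.1) = false := by
          simp only [beq_eq_false_iff_ne, ne_eq]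
          intro hqp
          exact hnd.1 (hqp ▸ List.mem_map_of_mem hq)
        rw [h1, h q (List.mem_cons_of_mem _ hq)]
        rfl
      rw [List.foldl_cons, if_pos hp, ih (d.insert p.1 p.2) hfresh hnd.2,
        PySem.Dict.items_insert_of_not_contains d p.2 (h p List.mem_cons_self),
        List.filter_cons, if_pos (by simpa using hp)]
      simp
    · rw [List.foldl_cons, if_neg hp, List.filter_cons,
        if_neg (by simpa using hp)]
      exact ih d (fun q hq => h q (List.mem_cons_of_mem _ hq)) hnd.2

-- running max over the keys with the dict lookup = running max over the items by value
theorem pv_max_fst (g : Int → Int) (l : List (Int × Int)) (acc : Option (Int × Int))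
    (hl : ∀ p ∈ l, g p.1 = p.2) (hacc : ∀ q ∈ acc, g q.1 = q.2) :
    l.foldl (fun a p => pvMStep g a p.1) (acc.map (fun q => q.1))
      = (l.foldl (pvMStep (fun p => p.2)) acc).map (fun q => q.1) := by
  induction l generalizing acc with
  | nil => rfl
  | cons p l ih =>
    have hp := hl p List.mem_cons_self
    cases acc with
    | none =>
      simp only [List.foldl_cons, Option.map_none, pvMStep]
      exact ih (some p) (fun q hq => hl q (List.mem_cons_of_mem _ hq)) (by simpa using hp)
    | some q =>
      have hq := hacc q rfl
      simp only [List.foldl_cons, Option.map_some, pvMStep, hp, hq]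
      by_cases hlt : q.2 < p.2
      · simp only [if_pos hlt]
        exact ih (some p) (fun r hr => hl r (List.mem_cons_of_mem _ hr)) (by simpa using hp)
      · simp only [if_neg hlt]
        exact ih (some q) (fun r hr => hl r (List.mem_cons_of_mem _ hr)) (by simpa using hq)

-- restarting the running max from a seed
theorem pv_mstep_from {α : Type} (key : α → Int) (l : List α) (p : α) :
    l.foldl (pvMStep key) (some p)
      = match l.foldl (pvMStep key) none with
        | none => some p
        | some q => if key p < key q then some q else some p := by
  induction l generalizing p with
  | nil => rfl
  | cons x l ih =>
    rw [List.foldl_cons]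
    have hstep : pvMStep key (some p) x = some (if key p < key x then x else p) := by
      simp only [pvMStep]
      split_ifs <;> rfl
    rw [hstep, ih,
      show (x :: l).foldl (pvMStep key) none = l.foldl (pvMStep key) (some x) from rfl, ih x]
    rcases hM : l.foldl (pvMStep key) none with _ | q
    · dsimp only
      split_ifs <;> rfl
    · dsimp only
      by_cases h1 : key p < key x <;> by_cases h2 : key x < key q <;>
        simp only [h1, h2, if_pos, if_false] <;> split_ifs <;>
        first | rfl | (exfalso; omega)

-- B's best/best_j fold = running max (first wins) over the reversed positive entries
theorem pv_lam_spec (l : List (Int × Int)) :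
    l.foldl pvLamStep (0, none)
      = match (l.filter (fun p => decide (p.2 > 0))).reverse.foldl
            (pvMStep (fun p => p.2)) none with
        | none => ((0 : Int), (none : Option Int))
        | some q => (q.2, some q.1) := by
  induction l using List.reverseRecOn with
  | nil => rfl
  | append_singleton l p ih =>
    rw [List.foldl_append, List.foldl_cons, List.foldl_nil, ih, List.filter_append]
    by_cases hp : p.2 > 0
    · rw [List.filter_cons, if_pos (by simpa using hp), List.filter_nil, List.reverse_append,
        List.reverse_singleton, List.singleton_append, List.foldl_cons,
        show pvMStep (fun p => p.2) none p = some p from rfl, pv_mstep_from]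
      rcases hM : (l.filter (fun p => decide (p.2 > 0))).reverse.foldl
          (pvMStep (fun p => p.2)) none with _ | q
      · rw [hM]
        dsimp only [pvLamStep]
        rw [if_pos ⟨hp, le_of_lt hp⟩]
      · rw [hM]
        dsimp only [pvLamStep]
        by_cases hge : p.2 ≥ q.2
        · rw [if_pos ⟨hp, hge⟩, if_neg (by omega : ¬ p.2 < q.2)]
        · rw [if_neg (by omega : ¬(p.2 > 0 ∧ p.2 ≥ q.2)), if_pos (by omega : p.2 < q.2)]
    · rw [List.filter_cons, if_neg (by simpa using hp), List.filter_nil, List.append_nil]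
      dsimp only [pvLamStep]
      rw [if_neg (fun hcon => hp hcon.1)]

def pvReps (vs : List Int) : PySem.Dict Int Int :=
  (PySem.List.enumerate vs.reverse).foldl
    (fun d p => if p.2 > 0 then d.insert p.1 p.2 else d) PySem.Dict.empty

def pvAfin (vs : List Int) : Bool × List (String × Int) :=
  match PySem.List.max? (pvReps vs).keys (fun k => (pvReps vs).getD k 0) with
  | some k =>
      if k ≠ 0 then
        (true, [("race", (vs.length : Int) - k), ("num_aff", (pvReps vs).getD k 0)])
      else (false, [])
  | none => (false, [])

-- B's final shape on the overlap-count list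
def pvBfin (vs : List Int) : Bool × List (String × Int) :=
  let res := (PySem.List.enumerate vs).foldl pvLamStep (0, none)
  match res.2 with
  | some j => (true, [("race", j + 1), ("num_aff", res.1)])
  | none => (false, [])

-- the D_ condition stated on the overlap-count list
def pvDcond (vs : List Int) : Prop :=
  vs ≠ [] ∧ 0 < vs.getLastD 0 ∧ ∀ v ∈ vs, v ≤ vs.getLastD 0

theorem pv_cou_countP (race2 r : List (Int × Int)) :
    pvOverlap race2 r = (race2.countP (fun c => r.contains c) : Int) := by
  simp [pvOverlap, PySem.List.len_eq, List.countP_eq_length_filter]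

theorem pv_nodup_enum_fst {α : Type} (xs : List α) (s : Int) :
    ((PySem.List.enumerate xs s).map (fun p => p.1)).Nodup := by
  exact List.pairwise_map.mpr ((PySem.List.pairwise_lt_enumerate xs s).imp ne_of_lt)

-- the running max by value commutes with a snd-preserving relabelling
theorem pv_mstep_map (h : Int × Int → Int × Int) (hk : ∀ p, (h p).2 = p.2)
    (l : List (Int × Int)) (acc : Option (Int × Int)) :
    (l.map h).foldl (pvMStep (fun p => p.2)) (acc.map h)
      = (l.foldl (pvMStep (fun p => p.2)) acc).map h := by
  induction l generalizing acc with
  | nil => rfl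
  | cons x l ih =>
    cases acc with
    | none => exact ih (some x)
    | some m =>
      simp only [List.map_cons, List.foldl_cons, Option.map_some, pvMStep, hk]
      by_cases hlt : m.2 < x.2
      · rw [if_pos hlt, if_pos hlt]
        simpa using ih (some x)
      · rw [if_neg hlt, if_neg hlt]
        simpa using ih (some m)

theorem pv_cnt_eq (race : List (Int × Int × Int)) :
    race.foldl (fun d i => d.insert (i.2.2, i.2.1) (d.getD (i.2.2, i.2.1) 0 + 1)) PySem.Dict.empty
      = PySem.Dict.counter (race.map (fun i => (i.2.2, i.2.1))) := by
  rw [← PySem.Dict.foldl_insert_getD_add_one_eq_counter, List.foldl_map]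

theorem pv_inner_eq (race2 : List (Int × Int)) (r : List (Int × Int × Int)) :
    (r.foldl (fun q i => if PySem.Set.contains q.1 (i.2.2, i.2.1) then q
        else (PySem.Set.add q.1 (i.2.2, i.2.1),
          q.2 + (PySem.Dict.counter race2).getD (i.2.2, i.2.1) 0)) (PySem.Set.empty, 0)).2
      = pvOverlap race2 (r.map (fun i => (i.2.2, i.2.1))) := by
  have h := pv_inner_spec race2 (r.map (fun i => (i.2.2, i.2.1))) PySem.Set.empty 0
  rw [List.foldl_map] at h
  rw [h, pv_cou_countP]
  simp [PySem.Set.contains, PySem.Set.empty]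

-- A's dict items are exactly the relabelled reversed positive entries
theorem pv_reps_items_eq (vs : List Int) :
    (pvReps vs).items
      = (((PySem.List.enumerate vs).filter (fun p => decide (p.2 > 0))).reverse).map
          (fun p => ((vs.length : Int) - 1 - p.1, p.2)) := by
  unfold pvReps
  rw [pv_reps_items _ _ (fun p _ => rfl) (pv_nodup_enum_fst vs.reverse 0), pv_enum_rev,
    List.filter_map, List.filter_reverse]
  rfl

-- the fst of B's fold is the running max of 0 and the values seen
theorem pv_lam_fst (l : List (Int × Int)) (st : Int × Option Int) (h0 : 0 ≤ st.1) :
    (l.foldl pvLamStep st).1 = (l.map (fun p => p.2)).foldl max st.1 := by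
  induction l generalizing st with
  | nil => rfl
  | cons p l ih =>
    rw [List.foldl_cons, List.map_cons, List.foldl_cons]
    dsimp only [pvLamStep]
    by_cases hc : p.2 > 0 ∧ p.2 ≥ st.1
    · rw [if_pos hc, show max st.1 p.2 = p.2 from by omega]
      exact ih (p.2, some p.1) (by dsimp; omega)
    · rw [if_neg hc, show max st.1 p.2 = st.1 from by omega]
      exact ih st h0

-- the snd of B's fold stays an index below N
theorem pv_lam_snd_lt (l : List (Int × Int)) (st : Int × Option Int) (N : Int)
    (hl : ∀ p ∈ l, p.1 < N) (hst : ∀ j, st.2 = some j → j < N) :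
    ∀ j, (l.foldl pvLamStep st).2 = some j → j < N := by
  induction l generalizing st with
  | nil => exact hst
  | cons p l ih =>
    rw [List.foldl_cons]
    refine ih (pvLamStep st p) (fun q hq => hl q (List.mem_cons_of_mem _ hq)) ?_
    intro j hj
    dsimp only [pvLamStep] at hj
    by_cases hc : p.2 > 0 ∧ p.2 ≥ st.1
    · rw [if_pos hc] at hj
      cases hj
      exact hl p List.mem_cons_self
    · rw [if_neg hc] at hj
      exact hst j hj

theorem pv_foldl_max_le (l : List Int) (m b : Int) :
    l.foldl max m ≤ b ↔ m ≤ b ∧ ∀ v ∈ l, v ≤ b := by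
  induction l generalizing m with
  | nil => simp
  | cons x l ih =>
    rw [List.foldl_cons, ih]
    constructor
    · rintro ⟨h1, h2⟩
      exact ⟨le_trans (le_max_left _ _) h1,
        fun v hv => by rcases List.mem_cons.mp hv with h | h
                       · exact h ▸ le_trans (le_max_right _ _) h1
                       · exact h2 v h⟩
    · rintro ⟨h1, h2⟩
      exact ⟨max_le h1 (h2 x List.mem_cons_self), fun v hv => h2 v (List.mem_cons_of_mem _ hv)⟩

-- B's fold lands on the last index exactly on the D_ condition
theorem pv_guard (vs : List Int) :
    ((PySem.List.enumerate vs).foldl pvLamStep (0, none)).2 = some ((vs.length : Int) - 1)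
      ↔ pvDcond vs := by
  induction vs using List.reverseRecOn with
  | nil =>
    simp only [PySem.List.enumerate_nil, List.foldl_nil, pvDcond]
    constructor
    · intro h; cases h
    · rintro ⟨h, _⟩; exact absurd rfl h
  | append_singleton ws a _ =>
    rw [PySem.List.enumerate_append, List.foldl_append]
    simp only [PySem.List.enumerate_cons, PySem.List.enumerate_nil, List.foldl_cons,
      List.foldl_nil, List.length_append, List.length_singleton, pvDcond,
      List.getLastD_concat]
    set st := (PySem.List.enumerate ws).foldl pvLamStep (0, none) with hst
    have hfst' : st.1 = ws.foldl max 0 := by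
      rw [hst, pv_lam_fst _ _ (by simp)]
      congr 1
      exact PySem.List.map_snd_enumerate ws 0
    have hsnd : ∀ j, st.2 = some j → j < (ws.length : Int) := by
      apply pv_lam_snd_lt _ _ _ _ (by rintro j ⟨⟩)
      intro p hp
      rcases (PySem.List.mem_enumerate_iff ws 0 p).mp hp with ⟨k, hk, hq⟩
      rw [hq]
      push_cast
      omega
    dsimp only [pvLamStep]
    have hidx : ((0 : Int) + ws.length) = (ws.length : Int) := by omega
    by_cases hc : a > 0 ∧ a ≥ st.1
    · rw [if_pos hc]
      simp only [hidx]
      constructor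
      · intro _
        have hall : ∀ v ∈ ws, v ≤ a := by
          have := (pv_foldl_max_le ws 0 a).mp (hfst' ▸ hc.2)
          exact this.2
        refine ⟨by simp, hc.1, ?_⟩
        intro v hv
        rcases List.mem_append.mp hv with h | h
        · exact hall v h
        · simp only [List.mem_singleton] at h; omega
      · intro _
        congr 1
        push_cast
        omega
    · rw [if_neg hc]
      constructor
      · intro h
        have := hsnd _ h
        exfalso
        push_cast at this ⊢
        omega
      · rintro ⟨_, ha, hall⟩
        exfalso
        apply hc
        refine ⟨ha, ?_⟩
        rw [hfst']
        apply le_of_eq_of_le (by rfl) ((pv_foldl_max_le ws 0 a).mpr ⟨by omega, ?_⟩)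
        intro v hv
        exact hall v (List.mem_append_left _ hv)

theorem pv_main (vs : List Int) :
    pvAfin vs = if ((PySem.List.enumerate vs).foldl pvLamStep (0, none)).2
        = some ((vs.length : Int) - 1) then (false, [])
      else pvBfin vs := by
  have hitems := pv_reps_items_eq vs
  set Q := (PySem.List.enumerate vs).filter (fun p => decide (p.2 > 0)) with hQ
  set h : Int × Int → Int × Int := fun p => ((vs.length : Int) - 1 - p.1, p.2) with hh
  have hQnodup : (Q.reverse.map (fun p => p.1)).Nodup := by
    rw [List.map_reverse, List.nodup_reverse]
    exact ((pv_nodup_enum_fst vs 0).sublist (List.filter_sublist.map _))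
  have hkeys : (pvReps vs).keys = (Q.reverse.map h).map (fun p => p.1) := by
    simp only [PySem.Dict.keys, hitems]
  have hkeysnodup : (pvReps vs).keys.Nodup := by
    rw [hkeys, List.map_map]
    have : ((fun p => p.1) ∘ h) = (fun x => (vs.length : Int) - 1 - x) ∘ (fun p : Int × Int => p.1) := rfl
    rw [this, ← List.map_map]
    exact hQnodup.map (fun a b hab => by omega)
  have hgetD : ∀ p ∈ (pvReps vs).items, (pvReps vs).getD p.1 0 = p.2 := by
    intro p hp
    exact PySem.Dict.getD_of_mem_items (pvReps vs) (by simpa using hp) hkeysnodup 0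
  have hmax : PySem.List.max? (pvReps vs).keys (fun k => (pvReps vs).getD k 0)
      = ((Q.reverse.foldl (pvMStep (fun p => p.2)) none).map h).map (fun p => p.1) := by
    rw [pv_max?_eq_foldl, hkeys, List.foldl_map,
      show (Option.none : Option Int)
        = (Option.none : Option (Int × Int)).map (fun p => p.1) from rfl]
    rw [pv_max_fst (fun k => (pvReps vs).getD k 0) (Q.reverse.map h) none
      (fun p hp => hgetD p (by rw [hitems]; exact hp)) (by rintro q ⟨⟩)]
    rw [show (Option.none : Option (Int × Int))
        = (Option.none : Option (Int × Int)).map h from rfl, pv_mstep_map h (fun p => rfl)]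
    rfl
  have hlam := pv_lam_spec (PySem.List.enumerate vs)
  unfold pvAfin pvBfin
  rw [hmax]
  rw [← hQ] at hlam
  rcases hM : Q.reverse.foldl (pvMStep (fun p => p.2)) none with _ | q
  · rw [hM] at hlam ⊢
    rw [hlam]
    simp
  · rw [hM] at hlam ⊢
    simp only [Option.map_some, hlam]
    have hqmem : q ∈ PySem.List.enumerate vs := by
      have : q ∈ Q.reverse := PySem.List.max?_mem (by rw [pv_max?_eq_foldl]; exact hM)
      exact List.mem_of_mem_filter (List.mem_reverse.mp this)
    have hqbound : 0 ≤ q.1 ∧ q.1 < (vs.length : Int) := by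
      rcases (PySem.List.mem_enumerate_iff vs 0 q).mp hqmem with ⟨k, hk, hq⟩
      rw [hq]
      constructor <;> [omega; (push_cast; omega)]
    have hval : (pvReps vs).getD (h q).1 0 = (h q).2 := by
      apply hgetD
      rw [hitems]
      apply List.mem_map_of_mem
      exact PySem.List.max?_mem (by rw [pv_max?_eq_foldl]; exact hM)
    have hq1 : (h q).1 = (vs.length : Int) - 1 - q.1 := rfl
    have hq2 : (h q).2 = q.2 := rfl
    rw [hval, hq1, hq2]
    by_cases hj : q.1 = (vs.length : Int) - 1
    · rw [if_neg (show ¬ ((vs.length : Int) - 1 - q.1 ≠ 0) from by omega),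
        if_pos (show some q.1 = some ((vs.length : Int) - 1) from by rw [hj])]
    · rw [if_pos (show (vs.length : Int) - 1 - q.1 ≠ 0 from by omega),
        if_neg (show ¬ (some q.1 = some ((vs.length : Int) - 1)) from by simpa using hj),
        show (vs.length : Int) - ((vs.length : Int) - 1 - q.1) = q.1 + 1 from by omega]

-- glue: each port computes its abstract form on the overlap-count list pvVs
theorem pv_portA (race : List (Int × Int × Int)) (prev_races : List (List (Int × Int × Int))) :
    check_repeat_times_slow race prev_races = pvAfin (pvVs race prev_races) := by
  simp only [check_repeat_times_slow, pvAfin, pvReps, pvVs]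
  conv_rhs => rw [← List.map_reverse, pv_enumerate_map, List.foldl_map]
  simp only [PySem.List.len_eq, List.length_map]
  rfl

theorem pv_portB (race : List (Int × Int × Int)) (prev_races : List (List (Int × Int × Int))) :
    check_repeat_times_slow_alt race prev_races = pvBfin (pvVs race prev_races) := by
  simp only [check_repeat_times_slow_alt, pvBfin, pvVs]
  rw [pv_cnt_eq]
  simp only [pv_inner_eq]
  rw [List.map_map, pv_enumerate_map, List.foldl_map]
  rfl

-- the overlap-count list is the map of the input-level counts
theorem pv_vs_eq (race : List (Int × Int × Int)) (prev_races : List (List (Int × Int × Int))) :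
    pvVs race prev_races = prev_races.map (fun r => (pvOverlapN race r : Int)) := by
  unfold pvVs
  rw [List.map_map]
  apply List.map_congr_left
  intro r _
  rw [Function.comp_apply, pv_cou_countP, List.countP_map]
  unfold pvOverlapN
  congr 1
  apply List.countP_congr
  intro i _
  simp [List.contains_eq_mem, Prod.ext_iff]

theorem pv_D_iff (race : List (Int × Int × Int)) (prev_races : List (List (Int × Int × Int))) :
    D_check_repeat_times_slow race prev_races ↔ pvDcond (pvVs race prev_races) := by
  rw [pv_vs_eq]
  unfold D_check_repeat_times_slow pvDcond
  induction prev_races using List.reverseRecOn with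
  | nil => simp
  | append_singleton ws a _ =>
    have hg : ((ws ++ [a]).map (fun r => (pvOverlapN race r : Int))).getLastD 0
        = (pvOverlapN race a : Int) := by
      rw [List.map_append, List.map_singleton, List.getLastD_concat]
    rw [hg, List.getLastD_concat]
    constructor
    · rintro ⟨_, h2, h3⟩
      refine ⟨by simp, by exact_mod_cast h2, ?_⟩
      intro v hv
      rcases List.mem_map.mp hv with ⟨r, hr, rfl⟩  -- map over ws ++ [a]
      exact_mod_cast h3 r hr
    · rintro ⟨_, h2, h3⟩
      refine ⟨by simp, by exact_mod_cast h2, ?_⟩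
      intro r hr
      exact_mod_cast h3 _ (List.mem_map_of_mem hr)

-- ===== VERDICT (by name: the statement is the Claim_ definition above) =====
theorem check_repeat_times_slow_spec : Claim_unchanged_check_repeat_times_slow := by
  intro race prev_races _ hD
  rw [pv_portA, pv_portB, pv_main,
    if_neg (fun hc => hD ((pv_D_iff race prev_races).mpr ((pv_guard _).mp hc)))]

theorem check_repeat_times_slow_changed : Claim_changed_check_repeat_times_slow := by
  unfold Claim_changed_check_repeat_times_slow
  refine ⟨by decide, by decide, by decide, by decide, by decide⟩

theorem check_repeat_times_slow_tight : Claim_exact_check_repeat_times_slow := by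
  intro race prev_races _ hD
  rw [pv_portA, pv_portB, pv_main,
    if_pos ((pv_guard _).mpr ((pv_D_iff race prev_races).mp hD))]
  have hg := (pv_guard (pvVs race prev_races)).mpr ((pv_D_iff race prev_races).mp hD)
  simp only [pvBfin, hg]
  simp
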